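-- pv_equiv track=rewrite | github.com/pacha64/fertiriego-rpi | main.py | decode_valves
-- ===== SOURCE A (Python) =====
-- def decode_valves(ListaValves):
--     CantValv = 0
--     CadValv = ""
--     i = 0
--     while (i < 9):  # Registros
--         j = 0
--         while (j < 8):  # bits
--             peso = ListaValves[i] & (2 ** j)
--             valv = (i * 8) + j + 1
--             if (peso != 0):
--                 if (CantValv == 0):
--                     CadValv = str(valv)
--                 else:
--                     CadValv = CadValv + ',' + str(valv)
--                 CantValv = CantValv + 1
--             j = j + 1
--         i = i + 1
--     return (CadValv)
-- ===== SOURCE B (Python) =====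
-- def decode_valves(ListaValves):
--     parts = []
--     for i in range(9):
--         b = ListaValves[i] & 0xFF
--         while b:
--             lsb = b & -b
--             b ^= lsb
--             parts.append(str(i * 8 + lsb.bit_length()))
--     return ','.join(parts)
-- ===== Notes on version B (the rewrite author's own statement) =====
-- stated objective: alternative
-- what changed: B replaces A's fixed 72-iteration bit test with per-byte lowest-set-bit extraction (b & -b, bit_length) over only the set bits, collecting parts into a list joined once at the end instead of A's counter-guarded string concatenation.
import Mathlib
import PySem

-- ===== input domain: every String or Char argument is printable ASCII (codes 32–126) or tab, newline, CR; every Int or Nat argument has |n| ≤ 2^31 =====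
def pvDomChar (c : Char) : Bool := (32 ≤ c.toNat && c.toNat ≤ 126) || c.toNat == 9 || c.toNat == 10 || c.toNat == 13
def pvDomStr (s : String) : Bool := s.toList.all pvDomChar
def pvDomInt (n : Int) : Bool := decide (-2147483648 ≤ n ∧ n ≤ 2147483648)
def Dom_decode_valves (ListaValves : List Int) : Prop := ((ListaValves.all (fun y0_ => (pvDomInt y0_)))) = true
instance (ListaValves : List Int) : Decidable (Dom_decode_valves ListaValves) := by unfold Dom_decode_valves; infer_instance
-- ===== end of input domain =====

-- B decodes each byte by extracting lowest set bits (b & -b / bit_length) instead of testing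
-- all 72 bit positions, and joins the collected parts once instead of A's counter-guarded
-- string concatenation (objective: alternative algorithm, similar cost).

-- ===== PORT A =====
-- literal port of A's nested while loops; ListaValves[i] is in range under Pre_ (9 ≤ length);
-- 2 ** j is ported as 2 ^ j.toNat, exact since j runs over 0..7.
def decode_valves (ListaValves : List Int) : String :=
  (((PySem.List.pyRange 0 9 1).foldl (fun st i =>
      (PySem.List.pyRange 0 8 1).foldl (fun st j =>
        let peso := PySem.Int.band (PySem.List.pyGetD ListaValves i 0) (2 ^ j.toNat)
        let valv := i * 8 + j + 1
        if peso ≠ 0 then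
          if st.1 = (0 : Int) then ((1 : Int), PySem.Int.toStr valv)
          else (st.1 + 1, st.2 ++ "," ++ PySem.Int.toStr valv)
        else st) st)
    ((0 : Int), ""))).2

-- ===== PORT B =====
-- the 'while b:' loop of Source B; the fuel only makes the recursion total — b = byte & 0xFF < 256
-- has at most 8 set bits, so the fuel is never exhausted where the loop runs.
def pvLsbLoop (fuel : Nat) (i b : Int) (parts : List String) : List String :=
  match fuel with
  | 0 => parts
  | fuel' + 1 =>
    if b ≠ 0 then
      let lsb := PySem.Int.band b (-b)
      pvLsbLoop fuel' i (PySem.Int.bxor b lsb)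
        (parts ++ [PySem.Int.toStr (i * 8 + (PySem.Int.bitLength lsb : Int))])
    else parts

def decode_valves_alt (ListaValves : List Int) : String :=
  PySem.Str.join ","
    ((PySem.List.pyRange 0 9 1).foldl (fun parts i =>
      pvLsbLoop 8 i (PySem.Int.band (PySem.List.pyGetD ListaValves i 0) 255) parts) [])

-- ===== PRECONDITION & SPEC =====
-- A raises IndexError (and so does B) when the list has fewer than 9 elements.
def Pre_decode_valves (ListaValves : List Int) : Prop := 9 ≤ ListaValves.length
instance (ListaValves : List Int) : Decidable (Pre_decode_valves ListaValves) := by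
  unfold Pre_decode_valves; infer_instance
def pvWitness_decode_valves : List Int := [255, 0, 1, 0, -7, 0, 0, 0, 128]

def Spec_decode_valves (ListaValves : List Int) (out : String) : Prop := out = decode_valves_alt ListaValves
instance (ListaValves : List Int) (out : String) : Decidable (Spec_decode_valves ListaValves out) := by unfold Spec_decode_valves; infer_instance

-- ===== CLAIM (what is proved, stated in full; the proofs are below) =====
def Claim_equal_decode_valves : Prop := ∀ (ListaValves : List Int), Dom_decode_valves ListaValves → Pre_decode_valves ListaValves → Spec_decode_valves ListaValves (decode_valves ListaValves)

-- ===== LEMMAS AND PROOFS =====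

-- the bit test A performs, as a Bool predicate on the bit index j
def pvPred (x j : Int) : Bool := decide (PySem.Int.band x (2 ^ j.toNat) ≠ 0)

-- the ascending list of set-bit indices A keeps
def pvJs (x : Int) : List Int := (PySem.List.pyRange 0 8 1).filter (pvPred x)

-- the strings contributed by byte i
def pvStrs (x i : Int) : List String := (pvJs x).map (fun j => PySem.Int.toStr (i * 8 + j + 1))

-- the bit indices (plus one) B's lsb loop emits
def pvBitJs (fuel : Nat) (b : Int) : List Int :=
  match fuel with
  | 0 => []
  | fuel' + 1 =>
    if b ≠ 0 then
      let lsb := PySem.Int.band b (-b)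
      ((PySem.Int.bitLength lsb : Nat) : Int) :: pvBitJs fuel' (PySem.Int.bxor b lsb)
    else []

-- A's string/counter update
def pvPush (st : Int × String) (t : String) : Int × String :=
  if st.1 = (0 : Int) then ((1 : Int), t) else (st.1 + 1, st.2 ++ "," ++ t)

theorem pvLsbLoop_eq (fuel : Nat) (i : Int) : ∀ (b : Int) (parts : List String),
    pvLsbLoop fuel i b parts = parts ++ (pvBitJs fuel b).map (fun j => PySem.Int.toStr (i * 8 + j)) := by
  induction fuel with
  | zero => intro b parts; simp [pvLsbLoop, pvBitJs]
  | succ f ih =>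
    intro b parts
    by_cases hb : b = 0
    · simp [pvLsbLoop, pvBitJs, hb]
    · simp [pvLsbLoop, pvBitJs, hb, ih]

theorem pvBand255_lt (x : Int) : 0 ≤ PySem.Int.band x 255 ∧ PySem.Int.band x 255 < 256 := by
  unfold PySem.Int.band
  simp only [show ((255:Int)).toNat = 255 from rfl]
  split_ifs with h1 h2 h3
  · have h := Nat.and_le_right (n := x.toNat) (m := 255)
    constructor <;> omega
  · omega
  · have h := Nat.sub_le 255 (255 &&& (-x - 1).toNat)
    constructor <;> omega
  · omega

-- bit n of 255 - m is the complement of bit n of m, for m < 256 and n < 8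
set_option maxRecDepth 4096 in
theorem pvTestSub : ∀ m : Fin 256, ∀ n : Fin 8,
    Nat.testBit (255 - (m : Nat)) (n : Nat) = !Nat.testBit (m : Nat) (n : Nat) := by decide

-- masking with 255 does not change any of the 8 tested bits
theorem pvPred_band255 (x j : Int) (hj : j ∈ PySem.List.pyRange 0 8 1) :
    pvPred (PySem.Int.band x 255) j = pvPred x j := by
  rw [PySem.List.mem_pyRange_one] at hj
  have hn8 : j.toNat < 8 := by omega
  have h255 : Nat.testBit 255 j.toNat = true := by
    set n := j.toNat with hn
    interval_cases n <;> rfl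
  have hcast : ((2:Int) ^ j.toNat) = ((2 ^ j.toNat : Nat) : Int) := by push_cast; ring
  by_cases hx : 0 ≤ x
  · have hx' : x = ((x.toNat : Nat) : Int) := by omega
    have key : PySem.Int.band (PySem.Int.band x 255) (2 ^ j.toNat)
        = PySem.Int.band x (2 ^ j.toNat) := by
      rw [hx', show ((255:Int)) = ((255 : Nat) : Int) from rfl, PySem.Int.band_natCast, hcast,
        PySem.Int.band_natCast, PySem.Int.band_natCast]
      congr 1
      rw [Nat.and_two_pow, Nat.and_two_pow, Nat.testBit_and, h255, Bool.and_true]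
    unfold pvPred
    rw [key]
  · have hb : PySem.Int.band x 255 = ((255 - (255 &&& (-x - 1).toNat) : Nat) : Int) := by
      unfold PySem.Int.band
      rw [if_neg hx, if_pos (by norm_num : (0:Int) ≤ 255)]
      simp only [show ((255:Int)).toNat = 255 from rfl]
    have hpow : ((2:Int) ^ j.toNat).toNat = 2 ^ j.toNat := by
      rw [hcast, Int.toNat_natCast]
    have hbp : PySem.Int.band x ((2:Int) ^ j.toNat)
        = ((2 ^ j.toNat - (2 ^ j.toNat &&& (-x - 1).toNat) : Nat) : Int) := by
      unfold PySem.Int.band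
      rw [if_neg hx, if_pos (pow_nonneg (by norm_num) _), hpow]
    have hb2 : PySem.Int.band ((255 - (255 &&& (-x - 1).toNat) : Nat) : Int) ((2:Int) ^ j.toNat)
        = (((255 - (255 &&& (-x - 1).toNat)) &&& 2 ^ j.toNat : Nat) : Int) := by
      rw [hcast, PySem.Int.band_natCast]
    unfold pvPred
    rw [hb, hb2, hbp]
    set k := (-x - 1).toNat with hk
    set n := j.toNat with hn
    have hm : 255 &&& k = k % 256 := by
      rw [Nat.and_comm]
      have h := Nat.and_two_pow_sub_one_eq_mod k 8
      norm_num at h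
      rw [show (256:Nat) = 2 ^ 8 by norm_num]
      exact h
    have hmlt : k % 256 < 256 := Nat.mod_lt _ (by norm_num)
    have hsub := pvTestSub ⟨k % 256, hmlt⟩ ⟨n, hn8⟩
    simp only at hsub
    have htk : Nat.testBit (k % 256) n = Nat.testBit k n := by
      rw [show (256:Nat) = 2 ^ 8 by norm_num, Nat.testBit_mod_two_pow,
        decide_eq_true hn8, Bool.true_and]
    have hpos : 0 < 2 ^ n := Nat.two_pow_pos n
    rw [hm, Nat.and_two_pow, Nat.two_pow_and, ← htk, hsub]
    cases hbit : Nat.testBit (k % 256) n <;> simp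

-- per-byte core, checked on all 256 byte values
set_option maxRecDepth 4096 in
theorem pvBitJs_eq : ∀ c : Fin 256,
    pvBitJs 8 ((c : Nat) : Int) = (pvJs ((c : Nat) : Int)).map (fun j => j + 1) := by decide

theorem pvStrs_eq (x i : Int) :
    pvLsbLoop 8 i (PySem.Int.band x 255) [] = pvStrs x i := by
  obtain ⟨h0, h1⟩ := pvBand255_lt x
  have hc : PySem.Int.band x 255 = (((⟨(PySem.Int.band x 255).toNat, by omega⟩ : Fin 256) : Nat) : Int) := by
    simp; omega
  rw [pvLsbLoop_eq, hc, pvBitJs_eq]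
  have hjs : pvJs ((((PySem.Int.band x 255).toNat : Nat)) : Int) = pvJs x := by
    have hback : ((((PySem.Int.band x 255).toNat : Nat)) : Int) = PySem.Int.band x 255 := by omega
    rw [hback]
    unfold pvJs
    exact List.filter_congr (fun j hj => pvPred_band255 x j hj)
  rw [hjs, List.map_map, pvStrs]
  simp [Function.comp, add_assoc]

-- Chars-level: appending one more part to a nonempty join
theorem pvCharsJoinSnoc (sep q : List Char) : ∀ (p : List Char) (l : List (List Char)),
    PySem.Chars.join sep (p :: (l ++ [q])) = PySem.Chars.join sep (p :: l) ++ sep ++ q := by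
  intro p l
  induction l generalizing p with
  | nil =>
    simp only [List.nil_append]
    rw [PySem.Chars.join_cons_cons, PySem.Chars.join_singleton, PySem.Chars.join_singleton]
  | cons r rest ih =>
    have h := ih r
    simp only [List.cons_append]
    rw [PySem.Chars.join_cons_cons, PySem.Chars.join_cons_cons, h]
    simp [List.append_assoc]

theorem pvJoinSnoc (ps : List String) (t : String) :
    PySem.Str.join "," (ps ++ [t]) =
      if ps = [] then t else PySem.Str.join "," ps ++ "," ++ t := by
  apply String.toList_inj.mp
  cases ps with
  | nil =>
    simp only [List.nil_append]
    rw [if_pos trivial]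
    simp [PySem.Str.join, PySem.Chars.join_singleton]
  | cons p rest =>
    have hne : (p :: rest) ≠ [] := by simp
    rw [if_neg hne]
    simp only [PySem.Str.join, String.toList_ofList, List.map_append, List.map_cons,
      List.map_nil, String.toList_append, List.cons_append]
    rw [pvCharsJoinSnoc]

theorem pvJoin_nil : PySem.Str.join "," [] = "" := by
  apply String.toList_inj.mp
  simp [PySem.Str.join, PySem.Chars.join_nil]

-- joining with pvPush equals building the list and joining once
theorem pvPush_join (ss : List String) : ∀ (ps : List String),
    ss.foldl pvPush (((ps.length : Nat) : Int), PySem.Str.join "," ps)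
      = ((((ps ++ ss).length : Nat) : Int), PySem.Str.join "," (ps ++ ss)) := by
  induction ss with
  | nil => intro ps; simp
  | cons t rest ih =>
    intro ps
    have hstep : pvPush (((ps.length : Nat) : Int), PySem.Str.join "," ps) t
        = ((((ps ++ [t]).length : Nat) : Int), PySem.Str.join "," (ps ++ [t])) := by
      unfold pvPush
      rw [pvJoinSnoc]
      by_cases hps : ps = []
      · subst hps; simp
      · have : ¬ (((ps.length : Nat) : Int) = 0) := by
          simp only [Int.natCast_eq_zero, List.length_eq_zero_iff]; exact hps
        rw [if_neg this, if_neg hps]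
        simp
    rw [List.foldl_cons, hstep, ih (ps ++ [t])]
    simp

-- folding pvPush byte by byte is folding it over the concatenation
theorem pvFoldFold (g : Int → List String) : ∀ (is : List Int) (st : Int × String),
    is.foldl (fun st i => (g i).foldl pvPush st) st = (is.flatMap g).foldl pvPush st := by
  intro is
  induction is with
  | nil => intro st; simp
  | cons i rest ih => intro st; simp [List.foldl_append, ih]

-- A's inner loop over byte i is pvPush folded over that byte's strings
theorem pvInnerA (x i : Int) (st : Int × String) :
    (PySem.List.pyRange 0 8 1).foldl (fun st j =>
        let peso := PySem.Int.band x (2 ^ j.toNat)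
        let valv := i * 8 + j + 1
        if peso ≠ 0 then
          if st.1 = (0 : Int) then ((1 : Int), PySem.Int.toStr valv)
          else (st.1 + 1, st.2 ++ "," ++ PySem.Int.toStr valv)
        else st) st
      = (pvStrs x i).foldl pvPush st := by
  unfold pvStrs pvJs
  rw [List.foldl_map, List.foldl_filter]
  apply PySem.List.foldl_congr_mem
  intro st' j hj
  simp only [pvPred, pvPush, decide_eq_true_eq]

-- ===== VERDICT (by name: the statement is the Claim_ definition above) =====
theorem decode_valves_spec : Claim_equal_decode_valves := by
  intro L hdom hpre
  unfold Spec_decode_valves decode_valves decode_valves_alt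
  have hA : ∀ st : Int × String,
      (PySem.List.pyRange 0 9 1).foldl (fun st i =>
        (PySem.List.pyRange 0 8 1).foldl (fun st j =>
          let peso := PySem.Int.band (PySem.List.pyGetD L i 0) (2 ^ j.toNat)
          let valv := i * 8 + j + 1
          if peso ≠ 0 then
            if st.1 = (0 : Int) then ((1 : Int), PySem.Int.toStr valv)
            else (st.1 + 1, st.2 ++ "," ++ PySem.Int.toStr valv)
          else st) st) st
      = (PySem.List.pyRange 0 9 1).foldl (fun st i =>
          (pvStrs (PySem.List.pyGetD L i 0) i).foldl pvPush st) st := by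
    intro st
    apply PySem.List.foldl_congr_mem
    intro st' i hi
    exact pvInnerA (PySem.List.pyGetD L i 0) i st'
  have hB : (PySem.List.pyRange 0 9 1).foldl (fun parts i =>
        pvLsbLoop 8 i (PySem.Int.band (PySem.List.pyGetD L i 0) 255) parts) []
      = (PySem.List.pyRange 0 9 1).foldl (fun parts i =>
          parts ++ pvStrs (PySem.List.pyGetD L i 0) i) [] := by
    apply PySem.List.foldl_congr_mem
    intro parts i hi
    rw [pvLsbLoop_eq]
    rw [← pvStrs_eq (PySem.List.pyGetD L i 0) i, pvLsbLoop_eq]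
    simp
  rw [hA, hB, PySem.List.foldl_append_eq_flatMap, List.nil_append,
    pvFoldFold (fun i => pvStrs (PySem.List.pyGetD L i 0) i) (PySem.List.pyRange 0 9 1)
      ((0 : Int), "")]
  have h0 : (((0 : Int)), "") = ((((([] : List String)).length : Nat) : Int), PySem.Str.join "," []) := by
    simp [pvJoin_nil]
  rw [h0, pvPush_join]
  simp
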